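-- pv_equiv track=rewrite | github.com/daniel-reich/ubiquitous-fiesta | hjZTbJNzKiSxTtbik_22.py | sort_by_string
-- ===== SOURCE A (Python) =====
-- def sort_by_string(lst, txt):
--   sorts = list(txt)
--   letters = []
--   for word in lst:
--     letters.append(word[0])
--   for char in sorts:
--     if char not in letters:
--       sorts.remove(char)
--   newlst = []
--   for char in sorts:
--     for word in lst:
--       if word[0] == char:
--         newlst.append(word)
--   return newlst
-- ===== SOURCE B (Python) =====
-- def sort_by_string(lst, txt):
--     groups = {}
--     for word in lst:
--         groups.setdefault(word[0], []).append(word)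
--     out = []
--     for char in txt:
--         out.extend(groups.get(char, []))
--     return out
-- ===== Notes on version B (the rewrite author's own statement) =====
-- stated objective: faster
-- what changed: B drops A's remove-during-iteration filtering pass entirely (chars it removes contribute no words anyway), groups words by first letter in a dict built once, and emits the group for each char of txt by a single lookup instead of rescanning lst per char.
import Mathlib
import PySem

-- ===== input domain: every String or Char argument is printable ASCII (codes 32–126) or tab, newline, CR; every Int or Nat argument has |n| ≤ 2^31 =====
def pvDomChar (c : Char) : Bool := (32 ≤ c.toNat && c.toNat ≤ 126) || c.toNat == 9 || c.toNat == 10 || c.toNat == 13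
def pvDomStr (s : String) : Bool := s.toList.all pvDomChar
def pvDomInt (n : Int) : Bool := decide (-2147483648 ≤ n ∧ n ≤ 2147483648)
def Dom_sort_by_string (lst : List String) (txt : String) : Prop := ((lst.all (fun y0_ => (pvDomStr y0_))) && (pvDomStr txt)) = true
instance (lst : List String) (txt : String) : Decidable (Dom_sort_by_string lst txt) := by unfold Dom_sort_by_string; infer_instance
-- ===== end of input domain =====

-- B groups words by first letter in a dict built once and emits each txt char's group by lookup,
-- dropping A's removal pass and its per-char rescan of lst (objective: faster).

-- ===== PORT A =====
-- word[0]; Python raises IndexError on an empty word (excluded by Pre_), so the default is never reached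
def aFirst (w : String) : Char := (PySem.Str.pyGet? w 0).getD ' '

-- cited by aRemoveLoop's decreasing_by
theorem removeGetD_length_le (xs : List Char) (v : Char) :
    ((PySem.List.remove? xs v).getD xs).length ≤ xs.length := by
  cases h : PySem.List.remove? xs v with
  | none => simp
  | some ys =>
      have hv : v ∈ xs := by
        by_contra hv
        rw [(PySem.List.remove?_eq_none_iff xs v).2 hv] at h
        cases h
      rw [PySem.List.remove?_eq_some_erase xs v hv] at h
      cases h
      simpa using List.length_erase_le (l := xs) (a := v)

-- 'for char in sorts: if char not in letters: sorts.remove(char)' — Python's iterator over the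
-- mutating list keeps an internal index i; remove deletes the first occurrence
def aRemoveLoop (letters : List Char) (sorts : List Char) (i : Nat) : List Char :=
  if h : i < sorts.length then
    let c := sorts[i]
    let sorts' := if letters.contains c then sorts else (PySem.List.remove? sorts c).getD sorts
    aRemoveLoop letters sorts' (i + 1)
  else sorts
termination_by sorts.length - i
decreasing_by
  have hle := removeGetD_length_le sorts sorts[i]
  split <;> omega

def sort_by_string (lst : List String) (txt : String) : List String :=
  let sorts := txt.toList
  let letters := lst.foldl (fun acc w => acc ++ [aFirst w]) []
  let sorts' := aRemoveLoop letters sorts 0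
  sorts'.foldl (fun newlst c =>
    lst.foldl (fun nl w => if aFirst w == c then nl ++ [w] else nl) newlst) []

-- ===== PORT B =====
-- word[0]; same IndexError on an empty word as A (excluded by Pre_)
def bFirst (w : String) : Char := (PySem.Str.pyGet? w 0).getD ' '

def sort_by_string_alt (lst : List String) (txt : String) : List String :=
  -- groups.setdefault(word[0], []).append(word)
  let groups := lst.foldl
    (fun d w => d.insert (bFirst w) (d.getD (bFirst w) [] ++ [w]))
    (PySem.Dict.empty : PySem.Dict Char (List String))
  -- out.extend(groups.get(char, []))
  txt.toList.foldl (fun out c => out ++ groups.getD c []) []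

-- ===== PRECONDITION & SPEC =====
-- Pre_ excludes lists containing an empty word, on which A raises IndexError at word[0]
def Pre_sort_by_string (lst : List String) (txt : String) : Prop := ∀ w ∈ lst, w ≠ ""
instance (lst : List String) (txt : String) : Decidable (Pre_sort_by_string lst txt) := by
  unfold Pre_sort_by_string; infer_instance
def pvWitness_sort_by_string : List String × String := (["ab", "ba", "xy"], "bax")

def Spec_sort_by_string (lst : List String) (txt : String) (out : List String) : Prop := out = sort_by_string_alt lst txt
instance (lst : List String) (txt : String) (out : List String) : Decidable (Spec_sort_by_string lst txt out) := by unfold Spec_sort_by_string; infer_instance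

-- ===== CLAIM (what is proved, stated in full; the proofs are below) =====
def Claim_equal_sort_by_string : Prop := ∀ (lst : List String) (txt : String), Dom_sort_by_string lst txt → Pre_sort_by_string lst txt → Spec_sort_by_string lst txt (sort_by_string lst txt)

-- ===== LEMMAS AND PROOFS =====

-- erasing one occurrence of a char whose group is empty does not change the flatMap
theorem flatMap_erase (xs : List Char) (c : Char) (f : Char → List String) (h : f c = []) :
    (xs.erase c).flatMap f = xs.flatMap f := by
  induction xs with
  | nil => rfl
  | cons x xs ih =>
      by_cases hx : x = c
      · subst hx
        simp [List.erase_cons_head, h]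
      · rw [List.erase_cons_tail (by simpa using hx)]
        simp [List.flatMap_cons, ih]

-- A's removal pass only removes chars with an empty group, so the flatMap is unchanged
theorem loop_flatMap (letters : List Char) (sorts : List Char) (i : Nat)
    (f : Char → List String) (h : ∀ c, letters.contains c = false → f c = []) :
    (aRemoveLoop letters sorts i).flatMap f = sorts.flatMap f := by
  unfold aRemoveLoop
  split
  · next hi =>
      dsimp only
      by_cases hc : letters.contains sorts[i] = true
      · rw [if_pos hc]
        exact loop_flatMap letters sorts (i + 1) f h
      · rw [if_neg hc]
        have hmem : sorts[i] ∈ sorts := List.getElem_mem hi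
        rw [PySem.List.remove?_eq_some_erase sorts sorts[i] hmem, Option.getD_some]
        rw [loop_flatMap letters (sorts.erase sorts[i]) (i + 1) f h]
        exact flatMap_erase sorts sorts[i] f (h _ (by simpa using hc))
  · rfl
termination_by sorts.length - i
decreasing_by
  · omega
  · have := List.length_erase_le (l := sorts) (a := sorts[i]); omega

-- the grouping dict holds, at each key c, exactly the words whose first letter is c, in lst order
theorem groups_getD (lst : List String) (d : PySem.Dict Char (List String)) (c : Char) :
    (lst.foldl (fun d w => d.insert (bFirst w) (d.getD (bFirst w) [] ++ [w])) d).getD c []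
      = d.getD c [] ++ lst.filter (fun w => bFirst w == c) := by
  induction lst generalizing d with
  | nil => simp
  | cons w ws ih =>
      rw [List.foldl_cons, ih, PySem.Dict.getD_insert]
      by_cases h : c = bFirst w
      · simp [h.symm]
      · have h' : (bFirst w == c) = false := by simpa using fun e => h e.symm
        simp [h, h']

-- a char not among the first letters has an empty group
theorem filter_eq_nil_of_not_mem (lst : List String) (c : Char)
    (h : (lst.map aFirst).contains c = false) :
    lst.filter (fun w => aFirst w == c) = [] := by
  rw [List.filter_eq_nil_iff]
  intro w hw
  simp only [List.contains_eq_mem, List.mem_map, decide_eq_false_iff_not, not_exists] at h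
  simpa using fun e => (h w ⟨hw, e⟩)

-- ===== VERDICT (by name: the statement is the Claim_ definition above) =====
theorem sort_by_string_spec : Claim_equal_sort_by_string := by
  intro lst txt _ _
  unfold Spec_sort_by_string sort_by_string sort_by_string_alt
  simp only [PySem.List.foldl_append_singleton_eq_map, List.nil_append]
  have hinner : ∀ (acc : List String) (c : Char),
      lst.foldl (fun nl w => if aFirst w == c then nl ++ [w] else nl) acc
        = acc ++ lst.filter (fun w => aFirst w == c) := by
    intro acc c
    simpa using PySem.List.foldl_append_if_eq_filter (fun w => aFirst w == c) lst acc
  have hfun : (fun (newlst : List String) (c : Char) =>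
        lst.foldl (fun nl w => if aFirst w == c then nl ++ [w] else nl) newlst)
      = (fun acc c => acc ++ lst.filter (fun w => aFirst w == c)) := by
    funext acc c; exact hinner acc c
  have hg : ∀ c : Char,
      (lst.foldl (fun d w => d.insert (bFirst w) (d.getD (bFirst w) [] ++ [w]))
        (PySem.Dict.empty : PySem.Dict Char (List String))).getD c []
        = lst.filter (fun w => bFirst w == c) := by
    intro c
    rw [groups_getD]
    simp [PySem.Dict.getD, PySem.Dict.get?, PySem.Dict.empty]
  calc (aRemoveLoop (lst.map aFirst) txt.toList 0).foldl (fun newlst c =>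
          lst.foldl (fun nl w => if aFirst w == c then nl ++ [w] else nl) newlst) []
      = (aRemoveLoop (lst.map aFirst) txt.toList 0).foldl
          (fun acc c => acc ++ lst.filter (fun w => aFirst w == c)) [] := by
        rw [hfun]
    _ = (aRemoveLoop (lst.map aFirst) txt.toList 0).flatMap
          (fun c => lst.filter (fun w => aFirst w == c)) := by
        simpa using PySem.List.foldl_append_eq_flatMap
          (fun c => lst.filter (fun w => aFirst w == c))
          (aRemoveLoop (lst.map aFirst) txt.toList 0) []
    _ = txt.toList.flatMap (fun c => lst.filter (fun w => aFirst w == c)) :=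
        loop_flatMap _ _ _ _ (fun c hc => filter_eq_nil_of_not_mem lst c hc)
    _ = txt.toList.foldl (fun out c => out ++
          (lst.foldl (fun d w => d.insert (bFirst w) (d.getD (bFirst w) [] ++ [w]))
            (PySem.Dict.empty : PySem.Dict Char (List String))).getD c []) [] := by
        rw [PySem.List.foldl_append_eq_flatMap, List.nil_append]
        simp only [hg]
        rfl
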